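-- pv_equiv track=rewrite | github.com/phillipbmartinez/python_exercises | python_exercises/Completed/18_buy_8_get_1_free.py | getCostOfCoffee
-- ===== SOURCE A (Python) =====
-- def getCostOfCoffee(numberOfCoffees, pricePerCoffee):
--     total_price = 0
--     cups_till_free_cup = 8
--
--     while cups_till_free_cup > 0:
--         if numberOfCoffees > 0:
--             numberOfCoffees -= 1
--             total_price += pricePerCoffee
--             cups_till_free_cup -= 1
--         else:
--             break
--
--         if cups_till_free_cup == 0:
--             numberOfCoffees -= 1
--             cups_till_free_cup = 8
--
--
--     return total_price
-- ===== SOURCE B (Python) =====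
-- def getCostOfCoffee(numberOfCoffees, pricePerCoffee):
--     # Closed form: every full group of 9 coffees has 1 free cup, so you pay
--     # for n - n // 9 cups (0 cups when no coffees are ordered).
--     if numberOfCoffees <= 0:
--         return 0
--     return (numberOfCoffees - numberOfCoffees // 9) * pricePerCoffee
-- ===== Notes on version B (the rewrite author's own statement) =====
-- stated objective: faster
-- what changed: Replaced the cup-by-cup simulation loop with closed-form arithmetic: paid cups = n - n//9, multiplied once by the price.
import Mathlib
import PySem

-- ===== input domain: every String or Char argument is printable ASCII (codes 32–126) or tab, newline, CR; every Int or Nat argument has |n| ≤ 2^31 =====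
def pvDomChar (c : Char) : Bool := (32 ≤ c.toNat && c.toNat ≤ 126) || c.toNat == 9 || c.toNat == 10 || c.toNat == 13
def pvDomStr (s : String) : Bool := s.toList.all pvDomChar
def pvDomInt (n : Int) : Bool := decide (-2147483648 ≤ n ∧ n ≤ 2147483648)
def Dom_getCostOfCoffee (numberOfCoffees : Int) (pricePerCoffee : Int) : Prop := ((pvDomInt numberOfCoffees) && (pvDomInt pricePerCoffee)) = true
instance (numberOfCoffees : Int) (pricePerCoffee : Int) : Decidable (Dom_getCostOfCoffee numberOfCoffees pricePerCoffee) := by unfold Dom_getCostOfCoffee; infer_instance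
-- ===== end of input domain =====

-- B replaces A's cup-by-cup simulation loop with closed-form arithmetic (faster).


-- ===== PORT A =====
-- the while loop; state = (numberOfCoffees, total_price, cups_till_free_cup)
def getCostOfCoffeeLoop (n : Int) (total : Int) (cups : Int) (price : Int) : Int :=
  if _h : cups > 0 then
    if h2 : n > 0 then
      -- numberOfCoffees -= 1; total_price += pricePerCoffee; cups_till_free_cup -= 1
      if cups - 1 = 0 then
        -- free cup: numberOfCoffees -= 1; cups_till_free_cup = 8
        getCostOfCoffeeLoop (n - 1 - 1) (total + price) 8 price
      else
        getCostOfCoffeeLoop (n - 1) (total + price) (cups - 1) price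
    else total
  else total
termination_by n.toNat
decreasing_by all_goals omega

def getCostOfCoffee (numberOfCoffees : Int) (pricePerCoffee : Int) : Int :=
  getCostOfCoffeeLoop numberOfCoffees 0 8 pricePerCoffee

-- ===== PORT B =====
def getCostOfCoffee_alt (numberOfCoffees : Int) (pricePerCoffee : Int) : Int :=
  if numberOfCoffees ≤ 0 then 0
  else (numberOfCoffees - PySem.Int.floordiv numberOfCoffees 9) * pricePerCoffee

-- ===== PRECONDITION & SPEC =====
def Spec_getCostOfCoffee (numberOfCoffees : Int) (pricePerCoffee : Int) (out : Int) : Prop := out = getCostOfCoffee_alt numberOfCoffees pricePerCoffee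
instance (numberOfCoffees : Int) (pricePerCoffee : Int) (out : Int) : Decidable (Spec_getCostOfCoffee numberOfCoffees pricePerCoffee out) := by unfold Spec_getCostOfCoffee; infer_instance

-- ===== CLAIM (what is proved, stated in full; the proofs are below) =====
def Claim_equal_getCostOfCoffee : Prop := ∀ (numberOfCoffees : Int) (pricePerCoffee : Int), Dom_getCostOfCoffee numberOfCoffees pricePerCoffee → Spec_getCostOfCoffee numberOfCoffees pricePerCoffee (getCostOfCoffee numberOfCoffees pricePerCoffee)

-- ===== LEMMAS AND PROOFS =====

-- number of paid cups when n coffees remain and `c` paid cups are left before the next free one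
def paidCups (n : Int) (c : Int) : Int :=
  if n ≤ 0 then 0
  else if n ≤ c then n
  else n - 1 - (n - c - 1) / 9

theorem paidCups_step_free (n : Int) (hn : 0 < n) :
    paidCups n 1 = 1 + paidCups (n - 2) 8 := by
  unfold paidCups; split_ifs <;> omega

theorem paidCups_step (n c : Int) (hn : 0 < n) (hc : 2 ≤ c) (hc8 : c ≤ 8) :
    paidCups n c = 1 + paidCups (n - 1) (c - 1) := by
  unfold paidCups; split_ifs <;> omega

theorem getCostOfCoffeeLoop_eq (n : Int) (t : Int) (c : Int) (p : Int)
    (hc1 : 1 ≤ c) (hc8 : c ≤ 8) :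
    getCostOfCoffeeLoop n t c p = t + p * paidCups n c := by
  induction n, t, c using getCostOfCoffeeLoop.induct (price := p) with
  | case1 n t c hcpos hnpos hfree ih =>
    rw [getCostOfCoffeeLoop, dif_pos hcpos, dif_pos hnpos, if_pos hfree]
    have hc1' : c = 1 := by omega
    subst hc1'
    rw [ih (by omega) (by omega), paidCups_step_free n hnpos]
    ring_nf
  | case2 n t c hcpos hnpos hfree ih =>
    rw [getCostOfCoffeeLoop, dif_pos hcpos, dif_pos hnpos, if_neg hfree]
    rw [ih (by omega) (by omega), paidCups_step n c hnpos (by omega) hc8]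
    ring
  | case3 n t c hcpos hnneg =>
    rw [getCostOfCoffeeLoop, dif_pos hcpos, dif_neg hnneg]
    have h0 : paidCups n c = 0 := by unfold paidCups; split_ifs <;> omega
    rw [h0]; ring
  | case4 n t c hcneg => omega

theorem getCostOfCoffee_spec : Claim_equal_getCostOfCoffee := by
  intro n p _
  unfold Spec_getCostOfCoffee getCostOfCoffee getCostOfCoffee_alt
  rw [getCostOfCoffeeLoop_eq n 0 8 p (by omega) (by omega)]
  rw [PySem.Int.floordiv_eq_ediv_of_pos (by omega)]
  unfold paidCups
  split_ifs with h1 h2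
  · omega
  · have h9 : n / 9 = 0 := by omega
    rw [h9]; ring
  · have h9 : n - 1 - (n - 8 - 1) / 9 = n - n / 9 := by omega
    rw [h9]; ring
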